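-- pv_equiv track=rewrite | github.com/Trr-ryt/DRIVER_LICENSE_PLATE_YOLO_MODEL | common/drv_lic_helper.py | split_license_plate_and_province
-- ===== SOURCE A (Python) =====
-- def split_license_plate_and_province(text):
--     """Split the license plate and province from the given text."""
--     # Find the last digit in the text
--     last_number_index = len(text) - 1
--     while last_number_index >= 0 and not text[last_number_index].isdigit():
--         last_number_index -= 1
--
--     if last_number_index >= 0:
--         # Split into license plate and province
--         license_plate = text[:last_number_index + 1]
--         province = text[last_number_index + 1:]
--         return license_plate, province
--     return None, None
-- ===== SOURCE B (Python) =====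
-- def split_license_plate_and_province(text):
--     """Split the license plate and province from the given text."""
--     # Single forward pass: accumulate characters; whenever a digit is seen,
--     # fold the pending run (plus the digit) into the plate, otherwise let it
--     # grow as the candidate province (the run after the last digit so far).
--     plate = ''
--     pending = ''
--     for ch in text:
--         if ch.isdigit():
--             plate += pending + ch
--             pending = ''
--         else:
--             pending += ch
--     if plate:
--         return plate, pending
--     return None, None
-- ===== Notes on version B (the rewrite author's own statement) =====
-- stated objective: alternative
-- what changed: Replaced the backward index scan plus two slices by a single forward fold that accumulates the plate and the trailing non-digit run directly, with no indexing or slicing.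
import Mathlib
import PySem

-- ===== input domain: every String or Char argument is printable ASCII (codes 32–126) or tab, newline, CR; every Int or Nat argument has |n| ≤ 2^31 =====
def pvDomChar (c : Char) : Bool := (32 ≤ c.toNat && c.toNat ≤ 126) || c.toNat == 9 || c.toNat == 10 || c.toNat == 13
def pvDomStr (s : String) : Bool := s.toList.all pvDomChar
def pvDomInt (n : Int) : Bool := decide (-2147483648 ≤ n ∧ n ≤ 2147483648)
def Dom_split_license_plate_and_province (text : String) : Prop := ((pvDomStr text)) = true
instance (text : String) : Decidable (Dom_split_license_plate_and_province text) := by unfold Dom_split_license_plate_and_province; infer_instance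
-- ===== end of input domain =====

-- B replaces A's backward index scan and slicing by a single forward fold; alternative (same cost).

-- ===== PORT A =====
-- A's while loop; the Nat argument k encodes the index last_number_index + 1 (k = 0 ↔ index -1).
def pvAFind (cs : List Char) : Nat → Int
  | 0 => -1
  | k+1 =>
    if ¬ PySem.Chars.isdigit ((PySem.List.pyGet? cs (k : Int)).getD ' ') then pvAFind cs k
    else (k : Int)

def split_license_plate_and_province (text : String) : Option String × Option String :=
  let cs := text.toList
  let last := pvAFind cs cs.length
  if last ≥ 0 then
    (some (String.ofList (PySem.List.slice cs none (some (last + 1)))),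
     some (String.ofList (PySem.List.slice cs (some (last + 1)) none)))
  else (none, none)

-- ===== PORT B =====
-- one step of B's forward loop: state = (plate so far, pending non-digit run)
def pvBStep (acc : List Char × List Char) (ch : Char) : List Char × List Char :=
  if PySem.Chars.isdigit ch then (acc.1 ++ acc.2 ++ [ch], []) else (acc.1, acc.2 ++ [ch])

def split_license_plate_and_province_alt (text : String) : Option String × Option String :=
  let st := text.toList.foldl pvBStep ([], [])
  if st.1 ≠ [] then (some (String.ofList st.1), some (String.ofList st.2)) else (none, none)

-- ===== PRECONDITION & SPEC =====
def Spec_split_license_plate_and_province (text : String) (out : Option String × Option String) : Prop := out = split_license_plate_and_province_alt text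
instance (text : String) (out : Option String × Option String) : Decidable (Spec_split_license_plate_and_province text out) := by unfold Spec_split_license_plate_and_province; infer_instance

-- ===== CLAIM (what is proved, stated in full; the proofs are below) =====
def Claim_equal_split_license_plate_and_province : Prop := ∀ (text : String), Dom_split_license_plate_and_province text → Spec_split_license_plate_and_province text (split_license_plate_and_province text)

-- ===== LEMMAS AND PROOFS =====

-- non-digit predicate used in the characterisations
def pvND (c : Char) : Bool := ¬ PySem.Chars.isdigit c

-- B's fold computes (reverse of dropWhile-non-digit of the reversed list, reverse of takeWhile-non-digit of the reversed list)
theorem pvB_fold_eq (cs : List Char) :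
    cs.foldl pvBStep ([], []) =
      (((cs.reverse.dropWhile pvND).reverse), ((cs.reverse.takeWhile pvND).reverse)) := by
  induction cs using List.reverseRecOn with
  | nil => simp
  | append_singleton l x ih =>
    rw [List.foldl_append, ih]
    by_cases hx : PySem.Chars.isdigit x = true
    · have hnd : pvND x = false := by simp [pvND, hx]
      simp [pvBStep, hx, hnd]
      rw [← List.append_assoc, ← List.reverse_append, List.takeWhile_append_dropWhile,
        List.reverse_reverse]
    · have hnd : pvND x = true := by simp [pvND] at hx ⊢; exact hx
      simp [pvBStep, hx, hnd]

-- A's backward scan ignores characters at indices ≥ k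
theorem pvAFind_append (l : List Char) (x : Char) (k : Nat) (hk : k ≤ l.length) :
    pvAFind (l ++ [x]) k = pvAFind l k := by
  induction k with
  | zero => rfl
  | succ k ih =>
    have hkl : k < l.length := hk
    have hget : (l ++ [x])[k]? = l[k]? := List.getElem?_append_left hkl
    simp [pvAFind, hget, ih (Nat.le_of_lt hkl)]

-- A's backward scan finds (length of the part of cs up to and including its last digit) - 1
theorem pvAFind_eq (cs : List Char) :
    pvAFind cs cs.length = ((cs.reverse.dropWhile pvND).length : Int) - 1 := by
  induction cs using List.reverseRecOn with
  | nil => rfl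
  | append_singleton l x ih =>
    have hlen : (l ++ [x]).length = l.length + 1 := by simp
    rw [hlen]
    have hget : (l ++ [x])[l.length]? = some x := by
      simp
    by_cases hx : PySem.Chars.isdigit x = true
    · have hnd : pvND x = false := by simp [pvND, hx]
      simp [pvAFind, hx, hnd]
    · have hnd : pvND x = true := by simp [pvND] at hx ⊢; exact hx
      have hstep : pvAFind (l ++ [x]) (l.length + 1) = pvAFind (l ++ [x]) l.length := by
        simp [pvAFind, hx]
      rw [hstep, pvAFind_append l x l.length (le_refl _), ih]
      simp [hnd]

-- the two halves of the reversed decomposition reassemble to cs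
theorem pv_reassemble (cs : List Char) :
    (cs.reverse.dropWhile pvND).reverse ++ (cs.reverse.takeWhile pvND).reverse = cs := by
  rw [← List.reverse_append, List.takeWhile_append_dropWhile, List.reverse_reverse]

-- splitting cs = d ++ t by take/drop at d's length
theorem pv_take_drop (d t c : List Char) (h : d ++ t = c) :
    c.take d.length = d ∧ c.drop d.length = t := by
  subst h; exact ⟨List.take_left, List.drop_left⟩

-- ===== VERDICT (by name: the statement is the Claim_ definition above) =====
theorem split_license_plate_and_province_spec : Claim_equal_split_license_plate_and_province := by
  intro text _
  unfold Spec_split_license_plate_and_province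
  simp only [split_license_plate_and_province, split_license_plate_and_province_alt,
    pvB_fold_eq, pvAFind_eq]
  generalize text.toList = cs
  have hre := pv_reassemble cs
  by_cases hnil : (cs.reverse.dropWhile pvND) = []
  · simp [hnil]
  · have hlen : 1 ≤ (cs.reverse.dropWhile pvND).length := by
      cases h : cs.reverse.dropWhile pvND with
      | nil => exact absurd h hnil
      | cons a as => simp
    have hdne : (cs.reverse.dropWhile pvND).reverse ≠ [] := by simpa using hnil
    have hp := pv_take_drop _ _ _ hre
    simp only [List.length_reverse] at hp
    simp [hlen, hdne, hp.1, hp.2]
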